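-- pv_equiv track=rewrite | github.com/StarsExpress/LeetCode-Repository | heaps/multiplication_state/multiplication_state.py | compute_final_state
-- ===== SOURCE A (Python) =====
-- import heapq
--
-- def _compute_multiple(multiplier: int, power: int, modulo: int) -> int:
--     # Compute (multiplier ** power) % modulo.
--     multiple = 1
--     while power > 0:
--         if power & 1:
--             multiple *= multiplier
--             multiple %= modulo
--
--         multiplier *= multiplier
--         multiplier %= modulo
--         power >>= 1
--
--     return multiple
--
-- def compute_final_state(nums: list[int], k: int, multiplier: int) -> list[int]:  # LeetCode Q.3266.
--     if multiplier == 1:  # Base case: keep multiplying 1.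
--         return nums
--
--     min_heap: list[tuple[int, int]] = []  # Format: (num, idx).
--     max_num = nums[0]
--     for idx, num in enumerate(nums):
--         heapq.heappush(min_heap, (num, idx))
--         if num > max_num:
--             max_num = num
--
--     while k > 0:
--         k -= 1
--         _, idx = heapq.heappop(min_heap)
--         nums[idx] *= multiplier
--         heapq.heappush(min_heap, (nums[idx], idx))
--         if nums[idx] > max_num:  # Cycle begins.
--             min_heap.clear()  # Reset.
--             break
--
--     modulo = 10 ** 9 + 7
--     power = k // len(nums)  # Common power for every num.
--     common_multiple = _compute_multiple(multiplier, power, modulo)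
--
--     for idx, num in enumerate(nums):
--         nums[idx] *= common_multiple
--         heapq.heappush(min_heap, (nums[idx], idx))
--         nums[idx] %= modulo
--
--     k %= len(nums)
--     while k > 0:
--         k -= 1
--         _, idx = heapq.heappop(min_heap)
--         nums[idx] *= multiplier  # Extra multiplier.
--         nums[idx] %= modulo
--
--     return nums
-- ===== SOURCE B (Python) =====
-- def compute_final_state(nums, k, multiplier):  # LeetCode Q.3266.
--     # Same result as A, but with no heap: phase 1 rescans for the current minimum's
--     # first index; the final partial round is a single sort instead of heap pops.
--     if multiplier == 1:
--         return nums
--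
--     max_num = max(nums)
--     while k > 0:
--         k -= 1
--         idx = nums.index(min(nums))
--         nums[idx] *= multiplier
--         if nums[idx] > max_num:
--             break
--
--     modulo = 10 ** 9 + 7
--     common = pow(multiplier, k // len(nums), modulo)
--     order = sorted((num * common, i) for i, num in enumerate(nums))
--     for i in range(len(nums)):
--         nums[i] = nums[i] * common % modulo
--     for _, i in order[:k % len(nums)]:
--         nums[i] = nums[i] * multiplier % modulo
--     return nums
-- ===== Notes on version B (the rewrite author's own statement) =====
-- stated objective: simpler
-- what changed: B drops the heap and the hand-rolled binary exponentiation: the simulation phase rescans nums for the first index of its minimum, the common factor uses builtin pow(multiplier, q, mod), and the final partial round is one sort of (value, index) pairs instead of heap pushes and pops.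
-- outside the precondition, e.g. on compute_final_state([2, 3], -1, 2): A returns [4, 3], B returns [2, 500000005]; on compute_final_state([], 0, 2): A raises IndexError, B raises ValueError
import Mathlib
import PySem

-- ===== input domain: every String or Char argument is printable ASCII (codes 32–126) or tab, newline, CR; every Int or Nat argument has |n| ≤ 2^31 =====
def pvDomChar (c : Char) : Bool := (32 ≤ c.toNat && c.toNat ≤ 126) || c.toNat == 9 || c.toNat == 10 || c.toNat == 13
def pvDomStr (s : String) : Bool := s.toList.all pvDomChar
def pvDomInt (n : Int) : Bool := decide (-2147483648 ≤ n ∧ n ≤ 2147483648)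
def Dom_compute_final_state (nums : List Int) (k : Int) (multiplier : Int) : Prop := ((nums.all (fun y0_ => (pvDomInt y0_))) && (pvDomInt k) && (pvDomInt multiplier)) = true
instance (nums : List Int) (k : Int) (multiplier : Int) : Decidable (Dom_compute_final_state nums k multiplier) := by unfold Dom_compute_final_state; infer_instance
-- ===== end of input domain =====

-- B re-implements A without a heap (rescan for the minimum; one sort for the last partial
-- round; builtin pow): same return value; both Pythons mutate `nums` in place the same way,
-- the equivalence proved here is about the return value.

-- ===== PORT A =====

-- Python tuple comparison (num, idx) <= (num', idx'), as heapq orders the entries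
def pvLe (a b : Int × Int) : Bool :=
  decide (a.1 < b.1) || (decide (a.1 = b.1) && decide (a.2 ≤ b.2))

-- heapq model: the heap is its multiset of entries; heappush appends, heappop removes the
-- smallest entry (exact: heapq's pop returns the minimum, tuples compared lexicographically)
def pvHeapMin : List (Int × Int) → Option (Int × Int)
  | [] => none
  | x :: xs =>
    match pvHeapMin xs with
    | none => some x
    | some m => if pvLe x m then some x else some m

-- A's _compute_multiple: square-and-multiply loop (power >>= 1 is floor division by 2,
-- exact for every int; power & 1 is PySem.Int.band)
def pvCMGo (multiplier power modulo multiple : Int) : Int :=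
  if h : power > 0 then
    let multiple' := if PySem.Int.band power 1 == 1 then PySem.Int.mod (multiple * multiplier) modulo else multiple
    pvCMGo (PySem.Int.mod (multiplier * multiplier) modulo) (PySem.Int.floordiv power 2) modulo multiple'
  else multiple
termination_by power.toNat
decreasing_by
  rw [PySem.Int.floordiv_eq_ediv_of_pos (by norm_num)]
  omega

def pvComputeMultiple (multiplier power modulo : Int) : Int :=
  pvCMGo multiplier power modulo 1

-- A's first while-loop: pop the min, multiply it, push it back; break (clearing the heap)
-- once the new value exceeds the original maximum
def pvLoop1 (multiplier maxN : Int) (k : Int) (heap : List (Int × Int)) (nums : List Int) :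
    Int × List (Int × Int) × List Int :=
  if h : k > 0 then
    match pvHeapMin heap with
    | none => (k - 1, heap, nums)  -- heappop([]) raises IndexError; unreachable under Pre_
    | some m =>
      let heap' := heap.erase m
      let newv := PySem.List.pyGetD nums m.2 0 * multiplier
      let nums' := PySem.List.pySetD nums m.2 newv
      if newv > maxN then (k - 1, [], nums')
      else pvLoop1 multiplier maxN (k - 1) (heap' ++ [(newv, m.2)]) nums'
  else (k, heap, nums)
termination_by k.toNat
decreasing_by omega

-- A's 'for idx, num in enumerate(nums)' distribution loop: nums[idx] *= common;
-- push (nums[idx], idx); nums[idx] %= modulo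
def pvPhase3 (common modulo : Int) (heap : List (Int × Int)) (nums : List Int) :
    List (Int × Int) × List Int :=
  (PySem.List.enumerate nums).foldl
    (fun st p =>
      let newv := PySem.List.pyGetD st.2 p.1 0 * common
      let nums1 := PySem.List.pySetD st.2 p.1 newv
      (st.1 ++ [(newv, p.1)], PySem.List.pySetD nums1 p.1 (PySem.Int.mod newv modulo)))
    (heap, nums)

-- A's last while-loop: k%n extra pops, each multiplied and reduced mod 1e9+7
def pvLoop2 (multiplier modulo : Int) (k : Int) (heap : List (Int × Int)) (nums : List Int) :
    List Int :=
  if h : k > 0 then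
    match pvHeapMin heap with
    | none => nums  -- heappop([]) raises IndexError; unreachable under Pre_
    | some m =>
      pvLoop2 multiplier modulo (k - 1) (heap.erase m)
        (PySem.List.pySetD nums m.2 (PySem.Int.mod (PySem.List.pyGetD nums m.2 0 * multiplier) modulo))
  else nums
termination_by k.toNat
decreasing_by omega

def compute_final_state (nums : List Int) (k : Int) (multiplier : Int) : List Int :=
  if multiplier == 1 then nums
  else
    match PySem.List.pyGet? nums 0 with
    | none => []  -- nums[0] raises IndexError on []: excluded by Pre_
    | some first =>
      let bm := (PySem.List.enumerate nums).foldl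
        (fun st p => (st.1 ++ [(p.2, p.1)], if p.2 > st.2 then p.2 else st.2))
        (([] : List (Int × Int)), first)
      let s1 := pvLoop1 multiplier bm.2 k bm.1 nums
      let modulo : Int := 10 ^ 9 + 7
      let power := PySem.Int.floordiv s1.1 (PySem.List.len s1.2.2)
      let common := pvComputeMultiple multiplier power modulo
      let s3 := pvPhase3 common modulo s1.2.1 s1.2.2
      let k2 := PySem.Int.mod s1.1 (PySem.List.len s3.2)
      pvLoop2 multiplier modulo k2 s3.1 s3.2

-- ===== PORT B =====

-- B's while-loop: rescan nums for its minimum's first index, multiply it there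
def pvBLoop (multiplier maxN : Int) (k : Int) (nums : List Int) : Int × List Int :=
  if h : k > 0 then
    match PySem.List.min? nums (fun v => v) with
    | none => (k - 1, nums)  -- min([]) raises ValueError; unreachable under Pre_
    | some mv =>
      match PySem.List.index? nums mv with
      | none => (k - 1, nums)  -- unreachable: the minimum is a member
      | some idx =>
        let newv := mv * multiplier
        let nums' := nums.set idx newv
        if newv > maxN then (k - 1, nums')
        else pvBLoop multiplier maxN (k - 1) nums'
  else (k, nums)
termination_by k.toNat
decreasing_by omega

def compute_final_state_alt (nums : List Int) (k : Int) (multiplier : Int) : List Int :=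
  if multiplier == 1 then nums
  else
    match PySem.List.max? nums (fun v => v) with
    | none => []  -- max([]) raises ValueError: excluded by Pre_
    | some mx =>
      let s := pvBLoop multiplier mx k nums
      let modulo : Int := 10 ^ 9 + 7
      -- pow(multiplier, s.1 // len(nums), modulo): the exponent is ≥ 0 under Pre_ (0 ≤ k)
      let common := PySem.Int.powMod multiplier (PySem.Int.floordiv s.1 (PySem.List.len s.2)).toNat modulo
      let order := PySem.List.sorted2
        ((PySem.List.enumerate s.2).map (fun p => (p.2 * common, p.1)))
        (fun q => q.1) (fun q => q.2)
      let nums2 := s.2.map (fun v => PySem.Int.mod (v * common) modulo)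
      let r := PySem.Int.mod s.1 (PySem.List.len s.2)
      (PySem.List.slice order none (some r)).foldl
        (fun cur q => PySem.List.pySetD cur q.2 (PySem.Int.mod (PySem.List.pyGetD cur q.2 0 * multiplier) modulo))
        nums2

-- ===== PRECONDITION & SPEC =====

-- Pre_ excludes empty nums, where A raises IndexError at nums[0] (B's max(nums) raises too),
-- and negative k, outside the natural domain (k counts multiplication steps): there A still
-- returns a value, an artefact mixing exponent 0 with k % len(nums) extra multiplications,
-- which B (whose pow would take a negative exponent) does not reproduce.
def Pre_compute_final_state (nums : List Int) (k : Int) (multiplier : Int) : Prop :=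
  nums ≠ [] ∧ 0 ≤ k

instance (nums : List Int) (k : Int) (multiplier : Int) : Decidable (Pre_compute_final_state nums k multiplier) := by
  unfold Pre_compute_final_state; infer_instance

def pvWitness_compute_final_state : List Int × Int × Int := ([2, 1, 3, 5, 6], 5, 2)

def Spec_compute_final_state (nums : List Int) (k : Int) (multiplier : Int) (out : List Int) : Prop := out = compute_final_state_alt nums k multiplier
instance (nums : List Int) (k : Int) (multiplier : Int) (out : List Int) : Decidable (Spec_compute_final_state nums k multiplier out) := by unfold Spec_compute_final_state; infer_instance

-- ===== CLAIM (what is proved, stated in full; the proofs are below) =====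
def Claim_equal_compute_final_state : Prop := ∀ (nums : List Int) (k : Int) (multiplier : Int), Dom_compute_final_state nums k multiplier → Pre_compute_final_state nums k multiplier → Spec_compute_final_state nums k multiplier (compute_final_state nums k multiplier)

-- ===== LEMMAS AND PROOFS =====

-- the Prop form of Python's tuple order on the heap entries
def pLe (a b : Int × Int) : Prop := a.1 < b.1 ∨ (a.1 = b.1 ∧ a.2 ≤ b.2)
def pLt (a b : Int × Int) : Prop := a.1 < b.1 ∨ (a.1 = b.1 ∧ a.2 < b.2)

-- the multiset of heap entries that mirrors nums: (value, index) for every position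
def pvPairs (nums : List Int) : List (Int × Int) :=
  (PySem.List.enumerate nums).map (fun p => (p.2, p.1))

lemma pvLe_iff (a b : Int × Int) : pvLe a b = true ↔ pLe a b := by
  simp [pvLe, pLe]

lemma pLe_antisymm {a b : Int × Int} (h1 : pLe a b) (h2 : pLe b a) : a = b := by
  obtain ⟨a1, a2⟩ := a; obtain ⟨b1, b2⟩ := b
  simp [pLe] at h1 h2 ⊢; omega

lemma pLe_total (a b : Int × Int) : pLe a b ∨ pLe b a := by
  obtain ⟨a1, a2⟩ := a; obtain ⟨b1, b2⟩ := b
  simp [pLe]; omega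

lemma pLt_of_pLe_ne {a b : Int × Int} (h : pLe a b) (hne : a.2 ≠ b.2) : pLt a b := by
  obtain ⟨a1, a2⟩ := a; obtain ⟨b1, b2⟩ := b
  simp [pLe] at h; simp at hne; simp [pLt]; omega

lemma pLe_of_pLt {a b : Int × Int} (h : pLt a b) : pLe a b := by
  obtain ⟨a1, a2⟩ := a; obtain ⟨b1, b2⟩ := b; simp [pLt] at h; simp [pLe]; omega

lemma pLe_trans {a b c : Int × Int} (h1 : pLe a b) (h2 : pLe b c) : pLe a c := by
  obtain ⟨a1, a2⟩ := a; obtain ⟨b1, b2⟩ := b; obtain ⟨c1, c2⟩ := c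
  simp [pLe] at h1 h2 ⊢; omega

lemma pLe_refl (a : Int × Int) : pLe a a := Or.inr ⟨rfl, le_refl _⟩

lemma set_mid (pre suf : List Int) (w v : Int) :
    (pre ++ v :: suf).set pre.length w = pre ++ w :: suf := by
  rw [List.set_append_right _ _ (le_refl _)]; simp

lemma getD_mid (pre suf : List Int) (v : Int) : (pre ++ v :: suf).getD pre.length 0 = v := by
  simp [List.getD_eq_getElem?_getD]

lemma pvHeapMin_spec : ∀ (h : List (Int × Int)) (m : Int × Int),
    pvHeapMin h = some m → m ∈ h ∧ ∀ x ∈ h, pLe m x := by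
  intro h
  induction h with
  | nil => intro m hm; simp [pvHeapMin] at hm
  | cons x xs ih =>
    intro m hm
    cases hx : pvHeapMin xs with
    | none =>
      simp only [pvHeapMin, hx, Option.some.injEq] at hm; subst hm
      refine ⟨List.mem_cons_self, ?_⟩
      intro y hy
      rcases List.mem_cons.mp hy with rfl | hy
      · exact pLe_refl _
      · exfalso
        cases xs with
        | nil => simp at hy
        | cons z zs =>
          cases h' : pvHeapMin zs
          · simp [pvHeapMin, h'] at hx
          · simp only [pvHeapMin, h'] at hx; split at hx <;> simp at hx
    | some m' =>
      obtain ⟨hmem', hmin'⟩ := ih m' hx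
      simp only [pvHeapMin, hx] at hm
      by_cases hc : pvLe x m' = true
      · rw [if_pos hc] at hm
        simp only [Option.some.injEq] at hm; subst hm
        refine ⟨List.mem_cons_self, ?_⟩
        intro y hy
        rcases List.mem_cons.mp hy with rfl | hy
        · exact pLe_refl _
        · exact pLe_trans ((pvLe_iff _ _).mp hc) (hmin' y hy)
      · rw [if_neg hc] at hm
        simp only [Option.some.injEq] at hm; subst hm
        refine ⟨List.mem_cons_of_mem _ hmem', ?_⟩
        intro y hy
        rcases List.mem_cons.mp hy with rfl | hy
        · rcases pLe_total m' y with h1 | h1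
          · exact h1
          · exact absurd ((pvLe_iff y m').mpr h1) (by simpa using hc)
        · exact hmin' y hy

lemma pvHeapMin_isSome {h : List (Int × Int)} (hne : h ≠ []) : (pvHeapMin h).isSome := by
  cases h with
  | nil => exact absurd rfl hne
  | cons x xs =>
    cases h' : pvHeapMin xs
    · simp [pvHeapMin, h']
    · simp only [pvHeapMin, h']; split <;> simp

lemma mem_pvPairs {x : Int × Int} {nums : List Int} :
    x ∈ pvPairs nums ↔ ∃ (j : Nat) (hj : j < nums.length), x = (nums[j], (j : Int)) := by
  simp only [pvPairs, List.mem_map, PySem.List.mem_enumerate_iff]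
  constructor
  · rintro ⟨p, ⟨j, hj, rfl⟩, rfl⟩
    exact ⟨j, hj, by simp⟩
  · rintro ⟨j, hj, rfl⟩
    exact ⟨((j : Int), nums[j]), ⟨j, hj, by simp⟩, rfl⟩

lemma pvHeapMin_of_perm {h s : List (Int × Int)} (hp : h.Perm s) {m : Int × Int}
    (hmem : m ∈ s) (hmin : ∀ x ∈ s, pLe m x) : pvHeapMin h = some m := by
  have hne : h ≠ [] := by
    rintro rfl
    rw [← hp.nil_eq] at hmem
    simp at hmem
  obtain ⟨m0, hm0⟩ := Option.isSome_iff_exists.mp (pvHeapMin_isSome hne)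
  obtain ⟨hm0mem, hm0min⟩ := pvHeapMin_spec h m0 hm0
  have h1 : pLe m0 m := hm0min m (hp.mem_iff.mpr hmem)
  have h2 : pLe m m0 := hmin m0 (hp.mem_iff.mp hm0mem)
  rw [hm0, pLe_antisymm h1 h2]

-- the popped entry is (min(nums), first index of the min)
lemma pvHeapMin_pairs {h : List (Int × Int)} {nums : List Int} (hp : h.Perm (pvPairs nums))
    {mv : Int} {idx : Nat} (hmin : PySem.List.min? nums (fun v => v) = some mv)
    (hidx : PySem.List.index? nums mv = some idx) :
    pvHeapMin h = some (mv, (idx : Int)) := by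
  obtain ⟨hk, hval, hfirst⟩ := PySem.List.getElem_of_index?_eq_some hidx
  apply pvHeapMin_of_perm hp
  · exact mem_pvPairs.mpr ⟨idx, hk, by rw [hval]⟩
  · intro x hx
    obtain ⟨j, hj, rfl⟩ := mem_pvPairs.mp hx
    have hle : mv ≤ nums[j] := PySem.List.min?_isMin hmin _ (List.getElem_mem hj)
    by_cases he : nums[j] = mv
    · right
      refine ⟨he.symm, ?_⟩
      by_contra hlt
      exact hfirst j (by omega) he
    · left; simp only; omega

-- replacing the popped entry by the updated one mirrors updating nums
lemma perm_step {nums : List Int} {mv : Int} {idx : Nat}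
    (hidx : PySem.List.index? nums mv = some idx) (newv : Int) :
    (((pvPairs nums).erase (mv, (idx : Int))) ++ [(newv, (idx : Int))]).Perm
      (pvPairs (nums.set idx newv)) := by
  obtain ⟨pre, suf, rfl, hlen, -⟩ := (PySem.List.index?_eq_some_iff _ _ _).mp hidx
  subst hlen
  have hsplit : ∀ (w : Int), pvPairs (pre ++ w :: suf) =
      pvPairs pre ++ ((w, (pre.length : Int)) ::
        (PySem.List.enumerate suf ((pre.length : Int) + 1)).map (fun p => (p.2, p.1))) := by
    intro w
    simp [pvPairs, PySem.List.enumerate_append, PySem.List.enumerate_cons]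
  rw [set_mid, hsplit, hsplit]
  have hnot : (mv, (pre.length : Int)) ∉ pvPairs pre := by
    intro hmem
    obtain ⟨j, hj, heq⟩ := mem_pvPairs.mp hmem
    have : ((pre.length : Int)) = (j : Int) := congrArg Prod.snd heq
    omega
  rw [List.erase_append_right _ hnot, List.erase_cons_head]
  rw [List.append_assoc]
  exact List.Perm.append_left _ (List.perm_append_singleton _ _)

-- the simulation loops agree; a positive leftover k means the heap was cleared
lemma loop1_eq (m maxN : Int) : ∀ (fuel : Nat) (k : Int) (heap : List (Int × Int)) (nums : List Int),
    k.toNat = fuel → nums ≠ [] → heap.Perm (pvPairs nums) →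
    (pvLoop1 m maxN k heap nums).1 = (pvBLoop m maxN k nums).1 ∧
    (pvLoop1 m maxN k heap nums).2.2 = (pvBLoop m maxN k nums).2 ∧
    (pvBLoop m maxN k nums).2.length = nums.length ∧
    (0 < (pvLoop1 m maxN k heap nums).1 → (pvLoop1 m maxN k heap nums).2.1 = []) ∧
    (0 ≤ k → 0 ≤ (pvLoop1 m maxN k heap nums).1) := by
  intro fuel
  induction fuel with
  | zero =>
    intro k heap nums hk hne hp
    have hk0 : ¬ k > 0 := by omega
    rw [pvLoop1, pvBLoop]
    simp [hk0]
  | succ n ih =>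
    intro k heap nums hk hne hp
    have hk0 : k > 0 := by omega
    obtain ⟨mv, hmv⟩ : ∃ mv, PySem.List.min? nums (fun v => v) = some mv := by
      cases h' : PySem.List.min? nums (fun v => v)
      · exact absurd ((PySem.List.min?_eq_none_iff _ _).mp h') hne
      · exact ⟨_, rfl⟩
    have hmem : mv ∈ nums := PySem.List.min?_mem hmv
    obtain ⟨idx, hidx⟩ : ∃ idx, PySem.List.index? nums mv = some idx :=
      Option.isSome_iff_exists.mp ((PySem.List.index?_isSome_iff _ _).mpr hmem)
    obtain ⟨hk_lt, hval, hfirst⟩ := PySem.List.getElem_of_index?_eq_some hidx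
    have hmin := pvHeapMin_pairs hp hmv hidx
    have hget : PySem.List.pyGetD nums ((idx : Int)) 0 = mv := by
      rw [PySem.List.pyGetD_natCast, List.getD_eq_getElem nums 0 hk_lt, hval]
    have hset : PySem.List.pySetD nums ((idx : Int)) (mv * m) = nums.set idx (mv * m) :=
      PySem.List.pySetD_natCast nums idx _
    have hlen : (nums.set idx (mv * m)).length = nums.length := List.length_set ..
    have hne' : nums.set idx (mv * m) ≠ [] := by
      intro h0
      exact hne (List.eq_nil_of_length_eq_zero (by rw [← hlen, h0]; rfl))
    rw [pvLoop1, pvBLoop]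
    simp only [hk0, dif_pos, hmin, hmv, hidx, hget, hset]
    by_cases hbr : mv * m > maxN
    · simp only [if_pos hbr]
      refine ⟨?_, ?_, ?_, ?_, ?_⟩ <;> simp [hlen]
      omega
    · simp only [if_neg hbr]
      have hperm' : ((heap.erase (mv, (idx : Int))) ++ [(mv * m, (idx : Int))]).Perm
          (pvPairs (nums.set idx (mv * m))) :=
        ((hp.erase _).append (List.Perm.refl _)).trans (perm_step hidx (mv * m))
      obtain ⟨e1, e2, e3, e4, e5⟩ := ih (k - 1) _ _ (by omega) hne' hperm'
      exact ⟨e1, e2, by rw [e3, hlen], e4, fun _ => e5 (by omega)⟩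

-- A's _compute_multiple is modular exponentiation
lemma pvCMGo_eq {md : Int} (hmd : 0 < md) : ∀ (e : Nat), 0 < e → ∀ (m acc : Int),
    pvCMGo m (e : Int) md acc = (acc * m ^ e).emod md := by
  intro e
  induction e using Nat.strong_induction_on with
  | _ e ih =>
    intro he m acc
    rw [pvCMGo]
    have hpos : (e : Int) > 0 := by exact_mod_cast he
    rw [dif_pos hpos]
    rw [PySem.Int.band_one]
    have hm2 : PySem.Int.mod ((e : Int)) 2 = ((e % 2 : Nat) : Int) := PySem.Int.mod_natCast e 2
    have hfd : PySem.Int.floordiv ((e : Int)) 2 = ((e / 2 : Nat) : Int) := PySem.Int.floordiv_natCast e 2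
    have hmodpos : ∀ a : Int, PySem.Int.mod a md = a % md := fun a => PySem.Int.mod_eq_emod_of_pos (a := a) hmd
    rw [hm2, hfd]
    by_cases h2 : e / 2 = 0
    · have he1 : e = 1 := by omega
      subst he1
      norm_num
      rw [pvCMGo]
      norm_num [hmodpos]
      rfl
    · have h2p : 0 < e / 2 := Nat.pos_of_ne_zero h2
      rw [ih (e / 2) (by omega) h2p]
      have hsq : Int.ModEq md ((m * m) % md) (m * m) := Int.emod_emod_of_dvd _ dvd_rfl
      have hpow : (m * m) ^ (e / 2) = m ^ (2 * (e / 2)) := by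
        rw [show m * m = m ^ 2 by ring, ← pow_mul]
      rcases Nat.mod_two_eq_zero_or_one e with hpar | hpar
      · rw [hpar]
        norm_num [hmodpos]
        have hme : Int.ModEq md (acc * ((m * m % md) ^ (e / 2))) (acc * m ^ e) := by
          have h1 := (Int.ModEq.refl (n := md) acc).mul (hsq.pow (e / 2))
          rwa [hpow, show 2 * (e / 2) = e by omega] at h1
        exact hme
      · rw [hpar]
        norm_num [hmodpos]
        have hme : Int.ModEq md ((acc * m) % md * ((m * m % md) ^ (e / 2))) (acc * m ^ e) := by
          have hsq2 : Int.ModEq md ((acc * m) % md) (acc * m) := Int.emod_emod_of_dvd _ dvd_rfl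
          have h1 := hsq2.mul (hsq.pow (e / 2))
          rwa [hpow, mul_assoc, ← pow_succ', show 2 * (e / 2) + 1 = e by omega] at h1
        exact hme

lemma pvComputeMultiple_eq {md : Int} (hmd : 1 < md) (m p : Int) :
    pvComputeMultiple m p md = PySem.Int.powMod m p.toNat md := by
  have hmd0 : 0 < md := by omega
  have hmod : PySem.Int.powMod m p.toNat md = (m ^ p.toNat) % md := by
    unfold PySem.Int.powMod
    exact PySem.Int.mod_eq_emod_of_pos hmd0
  rw [hmod]
  by_cases hp : 0 < p
  · have hcast : (p.toNat : Int) = p := by omega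
    have := pvCMGo_eq hmd0 p.toNat (by omega) m 1
    rw [hcast] at this
    unfold pvComputeMultiple
    rw [this, one_mul]
    rfl
  · have h0 : p.toNat = 0 := by omega
    rw [h0]
    unfold pvComputeMultiple
    rw [pvCMGo]
    rw [dif_neg hp]
    norm_num
    exact (Int.emod_eq_of_lt (by norm_num) hmd).symm

lemma phase3_go (c md : Int) : ∀ (todo done : List Int) (h : List (Int × Int)),
    (PySem.List.enumerate todo ((done.length : Int))).foldl
      (fun st p =>
        let newv := PySem.List.pyGetD st.2 p.1 0 * c
        let nums1 := PySem.List.pySetD st.2 p.1 newv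
        (st.1 ++ [(newv, p.1)], PySem.List.pySetD nums1 p.1 (PySem.Int.mod newv md)))
      (h, done ++ todo)
    = (h ++ (PySem.List.enumerate todo ((done.length : Int))).map (fun p => (p.2 * c, p.1)),
       done ++ todo.map (fun v => PySem.Int.mod (v * c) md)) := by
  intro todo
  induction todo with
  | nil => intro done h; simp
  | cons v rest ih =>
    intro done h
    rw [PySem.List.enumerate_cons]
    simp only [List.foldl_cons, List.map_cons]
    have hget : PySem.List.pyGetD (done ++ v :: rest) ((done.length : Int)) 0 = v := by
      rw [PySem.List.pyGetD_natCast]; exact getD_mid done rest v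
    have hset1 : PySem.List.pySetD (done ++ v :: rest) ((done.length : Int)) (v * c) = done ++ (v * c) :: rest := by
      rw [PySem.List.pySetD_natCast]; exact set_mid done rest (v * c) v
    have hset2 : PySem.List.pySetD (done ++ (v * c) :: rest) ((done.length : Int)) (PySem.Int.mod (v * c) md) = done ++ (PySem.Int.mod (v * c) md) :: rest := by
      rw [PySem.List.pySetD_natCast]; exact set_mid done rest _ _
    simp only [hget, hset1, hset2]
    have hlen : (((done ++ [PySem.Int.mod (v * c) md]).length : Nat) : Int) = (done.length : Int) + 1 := by
      simp
    have := ih (done ++ [PySem.Int.mod (v * c) md]) (h ++ [(v * c, (done.length : Int))])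
    rw [hlen] at this
    simpa using this

-- A's distribution loop: it appends the scaled pairs to the heap and maps nums
lemma phase3_eq (c md : Int) (h : List (Int × Int)) (nums : List Int) :
    pvPhase3 c md h nums =
      (h ++ (PySem.List.enumerate nums).map (fun p => (p.2 * c, p.1)),
       nums.map (fun v => PySem.Int.mod (v * c) md)) := by
  have hgo := phase3_go c md nums [] h
  simpa [pvPhase3] using hgo

-- popping r times from a heap that is a permutation of a strictly sorted list s
-- processes exactly the first r entries of s
lemma loop2_eq (m md : Int) : ∀ (n : Nat) (r : Int) (hp s : List (Int × Int)) (L : List Int),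
    r.toNat = n → hp.Perm s → s.Pairwise pLt → n ≤ s.length →
    pvLoop2 m md r hp L =
      (s.take n).foldl
        (fun cur q => PySem.List.pySetD cur q.2 (PySem.Int.mod (PySem.List.pyGetD cur q.2 0 * m) md)) L := by
  intro n
  induction n with
  | zero =>
    intro r hp s L hr _ _ _
    have hr0 : ¬ r > 0 := by omega
    rw [pvLoop2, dif_neg hr0]
    simp
  | succ n ih =>
    intro r hp s L hr hperm hpw hlen
    have hr0 : r > 0 := by omega
    cases s with
    | nil => simp at hlen
    | cons hd tl =>
      obtain ⟨hhd, htl⟩ := List.pairwise_cons.mp hpw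
      have hmin : pvHeapMin hp = some hd := by
        apply pvHeapMin_of_perm hperm List.mem_cons_self
        intro x hx
        rcases List.mem_cons.mp hx with rfl | hx
        · exact pLe_refl _
        · exact pLe_of_pLt (hhd x hx)
      rw [pvLoop2, dif_pos hr0, hmin]
      dsimp only
      have hperm' : (hp.erase hd).Perm tl := by
        have := hperm.erase hd
        rwa [List.erase_cons_head] at this
      rw [ih (r - 1) (hp.erase hd) tl _ (by omega) hperm' htl (by simpa using hlen)]
      simp [List.take_succ_cons]

lemma pvBefore_true {a b : Int × Int}
    (h : (decide (a.1 < b.1) || (!decide (b.1 < a.1) && decide (a.2 < b.2))) = true) : pLe a b := by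
  simp at h; simp [pLe]; omega

lemma pvBefore_false {a b : Int × Int}
    (h : (decide (a.1 < b.1) || (!decide (b.1 < a.1) && decide (a.2 < b.2))) = false) : pLe b a := by
  simp at h; simp [pLe]; omega

lemma ins_pairwise (x : Int × Int) : ∀ (ys : List (Int × Int)), ys.Pairwise pLe →
    (PySem.List.insertBy (fun a b => decide (a.1 < b.1) || (!decide (b.1 < a.1) && decide (a.2 < b.2))) x ys).Pairwise pLe := by
  intro ys
  induction ys with
  | nil => intro _; simp [PySem.List.insertBy]
  | cons y ys ih =>
    intro hp
    rw [PySem.List.insertBy]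
    obtain ⟨hy, hys⟩ := List.pairwise_cons.mp hp
    split
    · rename_i hb
      refine List.pairwise_cons.mpr ⟨?_, hp⟩
      intro z hz
      rcases List.mem_cons.mp hz with rfl | hz
      · exact pvBefore_true hb
      · exact pLe_trans (pvBefore_true hb) (hy z hz)
    · rename_i hb
      refine List.pairwise_cons.mpr ⟨?_, ih hys⟩
      intro z hz
      rcases (PySem.List.insertBy_mem_iff _ _ _ _).mp hz with rfl | hz
      · exact pvBefore_false (by simpa using hb)
      · exact hy z hz

lemma foldl_ins_pairwise : ∀ (xs acc : List (Int × Int)), acc.Pairwise pLe →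
    (xs.foldl (fun acc x => PySem.List.insertBy (fun a b => decide (a.1 < b.1) || (!decide (b.1 < a.1) && decide (a.2 < b.2))) x acc) acc).Pairwise pLe := by
  intro xs
  induction xs with
  | nil => intro acc h; exact h
  | cons x xs ih => intro acc h; exact ih _ (ins_pairwise x acc h)

lemma order_pairwise (xs : List (Int × Int)) :
    (PySem.List.sorted2 xs (fun q => q.1) (fun q => q.2)).Pairwise pLe := by
  have hdef : PySem.List.sorted2 xs (fun q => q.1) (fun q => q.2) =
      xs.foldl (fun acc x => PySem.List.insertBy (fun a b => decide (a.1 < b.1) || (!decide (b.1 < a.1) && decide (a.2 < b.2))) x acc) [] := rfl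
  rw [hdef]
  exact foldl_ins_pairwise xs [] List.Pairwise.nil

lemma build_max : ∀ (l : List Int) (s a : Int),
    (PySem.List.enumerate l s).foldl (fun acc p => if p.2 > acc then p.2 else acc) a = l.foldl max a := by
  intro l
  induction l with
  | nil => intro s a; simp
  | cons x xs ih =>
    intro s a
    rw [PySem.List.enumerate_cons]
    simp only [List.foldl_cons]
    rw [ih]
    congr 1
    split_ifs <;> [rw [max_eq_right (by omega)]; rw [max_eq_left (by omega)]]

-- ===== VERDICT (by name: the statement is the Claim_ definition above) =====
theorem compute_final_state_spec : Claim_equal_compute_final_state := by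
  intro nums k multiplier _ hpre
  obtain ⟨hne, hk⟩ := hpre
  unfold Spec_compute_final_state compute_final_state compute_final_state_alt
  by_cases hm1 : (multiplier == 1) = true
  · rw [if_pos hm1, if_pos hm1]
  · rw [if_neg hm1, if_neg hm1]
    obtain ⟨n0, rest, rfl⟩ : ∃ a l, nums = a :: l := by
      cases nums with
      | nil => exact absurd rfl hne
      | cons a l => exact ⟨a, l, rfl⟩
    rw [PySem.List.pyGet?_zero_cons, PySem.List.max?_id_cons]
    simp only [PySem.List.foldl_prod_mk (f := fun acc (p : Int × Int) => acc ++ [(p.2, p.1)])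
        (g := fun acc (p : Int × Int) => if p.2 > acc then p.2 else acc),
      PySem.List.foldl_append_singleton_eq_map, List.nil_append, build_max,
      List.foldl_cons, max_self]
    obtain ⟨e1, e2, e3, e4, e5⟩ := loop1_eq multiplier (List.foldl max n0 rest) k.toNat k
      (List.map (fun x => (x.2, x.1)) (PySem.List.enumerate (n0 :: rest))) (n0 :: rest)
      rfl hne (List.Perm.refl _)
    set P := pvLoop1 multiplier (List.foldl max n0 rest) k
      (List.map (fun x => (x.2, x.1)) (PySem.List.enumerate (n0 :: rest))) (n0 :: rest) with hP
    set Q := pvBLoop multiplier (List.foldl max n0 rest) k (n0 :: rest) with hQ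
    rw [phase3_eq, pvComputeMultiple_eq (by norm_num), e1, e2]
    simp only [PySem.List.len_eq, List.length_map]
    set C := PySem.Int.powMod multiplier (PySem.Int.floordiv Q.1 ((Q.2.length : Int))).toNat (10 ^ 9 + 7) with hC
    set pairsC := List.map (fun p => (p.2 * C, p.1)) (PySem.List.enumerate Q.2) with hpairs
    set order := PySem.List.sorted2 pairsC (fun q => q.1) (fun q => q.2) with horder
    have hn : (0 : Int) < ((Q.2.length : Int)) := by rw [e3]; exact_mod_cast Nat.succ_pos _
    have hperm : pairsC.Perm order := (PySem.List.sorted2_perm pairsC _ _ _).symm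
    have h1 : order.Pairwise pLe := order_pairwise pairsC
    have hsndP : (pairsC.map (fun q => q.2)).Nodup := by
      rw [hpairs, List.map_map]
      have hcomp : ((fun q : Int × Int => q.2) ∘ (fun p : Int × Int => (p.2 * C, p.1))) = fun p : Int × Int => p.1 := rfl
      rw [hcomp, PySem.List.map_fst_enumerate]
      exact PySem.List.nodup_pyRange_one _ _
    have hsndO : (order.map (fun q => q.2)).Nodup := ((hperm.map _).nodup_iff).mp hsndP
    have hpw : order.Pairwise pLt := by
      have hand := List.Pairwise.and h1 (List.pairwise_map.mp hsndO)
      exact hand.imp (fun hab => pLt_of_pLe_ne hab.1 hab.2)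
    have hOL : order.length = Q.2.length := by
      rw [← hperm.length_eq, hpairs, List.length_map, PySem.List.length_enumerate]
    have hlen2 : (PySem.Int.mod Q.1 ((Q.2.length : Int))).toNat ≤ order.length := by
      have := PySem.Int.mod_lt Q.1 hn
      omega
    by_cases hQpos : 0 < Q.1
    · rw [e4 (by rw [e1]; exact hQpos), List.nil_append]
      rw [loop2_eq multiplier (10 ^ 9 + 7) (PySem.Int.mod Q.1 ((Q.2.length : Int))).toNat
        (PySem.Int.mod Q.1 ((Q.2.length : Int))) pairsC order _ rfl hperm hpw hlen2]
      rw [PySem.List.slice_to order (PySem.Int.mod_nonneg Q.1 hn)]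
    · have hQ0 : Q.1 = 0 := by have h5 := e5 hk; rw [e1] at h5; omega
      rw [hQ0]
      have hmz : PySem.Int.mod 0 ((Q.2.length : Int)) = 0 := by
        rw [PySem.Int.mod_eq_emod_of_pos hn]; simp
      rw [hmz]
      rw [pvLoop2, dif_neg (by norm_num)]
      rw [PySem.List.slice_to order (le_refl 0)]
      simp
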